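-- pv_equiv track=rewrite | github.com/fjmartinezsanchezact/tamc-monitor-web | src/core/20_robustness_zthr_summary.py | _pick_event
-- ===== SOURCE A (Python) =====
-- from typing import List, Optional, Tuple
--
-- def _pick_event(available: List[str], event: Optional[str], event_substr: Optional[str]) -> str:
--     if event:
--         if event in available:
--             return event
--         raise ValueError(f"Event '{event}' not found in available events (n={len(available)}).")
--
--     if not event_substr:
--         raise ValueError("Provide either --event (exact) or --event-substr (substring).")
--
--     matches = [e for e in available if event_substr.lower() in e.lower()]
--     if len(matches) == 0:
--         examples = available[:8]
--         raise ValueError(f"No event matches event_substr='{event_substr}'. Available examples: {examples} ...")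
--     if len(matches) > 1:
--         # si hay varias coincidencias, elegimos la más “corta” (suele ser más específica)
--         matches = sorted(matches, key=len)
--     return matches[0]
-- ===== SOURCE B (Python) =====
-- from typing import List, Optional
--
-- def _pick_event(available: List[str], event: Optional[str], event_substr: Optional[str]) -> str:
--     if event:
--         if event in available:
--             return event
--         raise ValueError(f"Event '{event}' not found in available events (n={len(available)}).")
--
--     if not event_substr:
--         raise ValueError("Provide either --event (exact) or --event-substr (substring).")
--
--     sub = event_substr.lower()
--     best = None
--     for e in available:
--         if sub in e.lower():
--             if best is None or len(e) < len(best):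
--                 best = e
--     if best is None:
--         examples = available[:8]
--         raise ValueError(f"No event matches event_substr='{event_substr}'. Available examples: {examples} ...")
--     return best
-- ===== Notes on version B (the rewrite author's own statement) =====
-- stated objective: simpler
-- what changed: Replaces the build-matches-list-then-stable-sort-by-length selection with a single linear scan over available that keeps a running best (updated only on strictly shorter length, preserving the stable-sort tie-break), lowering the substring pattern once.
import Mathlib
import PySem

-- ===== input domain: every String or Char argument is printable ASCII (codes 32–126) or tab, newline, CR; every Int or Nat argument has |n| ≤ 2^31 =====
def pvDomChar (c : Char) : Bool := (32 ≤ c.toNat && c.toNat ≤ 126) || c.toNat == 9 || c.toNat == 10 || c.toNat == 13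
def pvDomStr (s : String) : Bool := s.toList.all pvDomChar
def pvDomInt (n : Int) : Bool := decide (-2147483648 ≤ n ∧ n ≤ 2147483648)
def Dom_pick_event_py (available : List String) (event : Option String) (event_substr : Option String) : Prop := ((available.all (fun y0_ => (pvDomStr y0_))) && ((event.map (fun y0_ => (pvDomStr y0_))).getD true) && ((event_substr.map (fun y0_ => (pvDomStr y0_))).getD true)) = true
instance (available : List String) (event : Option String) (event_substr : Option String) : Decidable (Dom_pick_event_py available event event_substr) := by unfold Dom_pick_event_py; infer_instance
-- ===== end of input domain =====

-- B replaces A's filter-then-stable-sort-by-length selection with a single linear scan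
-- keeping the first-seen shortest match (objective: simpler); equal wherever A returns (Pre_).


-- ===== PORT A =====
-- the substring part of A (after the `event` guard): build the list of matches,
-- stable-sort it by length when there is more than one, return matches[0].
-- Raising branches return "" and are excluded by Pre_.
def pickA_matches (available : List String) (sub : String) : List String :=
  available.filter (fun e => PySem.Str.isIn (PySem.Str.lower sub) (PySem.Str.lower e))

def pickA_sub (available : List String) (event_substr : Option String) : String :=
  match event_substr with
  | none => ""                           -- raise: neither given
  | some sub =>
    if sub = "" then ""                  -- raise: neither given (falsy substr)
    else if (pickA_matches available sub).length = 0 then ""      -- raise: no event matches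
    else if (pickA_matches available sub).length > 1 then
      (PySem.List.sorted (pickA_matches available sub) (fun e => PySem.Str.len e)).headD ""
    else (pickA_matches available sub).headD ""

def pick_event_py (available : List String) (event : Option String) (event_substr : Option String) : String :=
  match event with
  | some ev =>
    if ev ≠ "" then
      (if ev ∈ available then ev else "")   -- raise: event not found
    else pickA_sub available event_substr
  | none => pickA_sub available event_substr

-- ===== PORT B =====
-- one linear scan: keep the first-seen match of strictly smallest length.
def pickB_best (subL : String) (available : List String) : Option String :=
  available.foldl
    (fun best e =>
      if PySem.Str.isIn subL (PySem.Str.lower e) then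
        match best with
        | none => some e
        | some b => if PySem.Str.len e < PySem.Str.len b then some e else some b
      else best)
    none

def pick_event_py_alt (available : List String) (event : Option String) (event_substr : Option String) : String :=
  match event with
  | some ev =>
    if ev ≠ "" then
      (if ev ∈ available then ev else "")   -- raise: event not found
    else
      match event_substr with
      | none => ""
      | some sub =>
        if sub = "" then ""
        else (pickB_best (PySem.Str.lower sub) available).getD ""    -- none = raise: no match
  | none =>
      match event_substr with
      | none => ""
      | some sub =>
        if sub = "" then ""
        else (pickB_best (PySem.Str.lower sub) available).getD ""

-- ===== PRECONDITION & SPEC =====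
-- Pre_ excludes exactly the inputs where A raises ValueError: a non-empty event absent from
-- available; neither a non-empty event nor a non-empty event_substr; or a non-empty
-- event_substr (with no event) matching nothing in available.
def PreSub_pick (available : List String) (event_substr : Option String) : Prop :=
  match event_substr with
  | none => False
  | some sub => sub ≠ "" ∧ ∃ e ∈ available, PySem.Str.isIn (PySem.Str.lower sub) (PySem.Str.lower e) = true

def Pre_pick_event_py (available : List String) (event : Option String) (event_substr : Option String) : Prop :=
  match event with
  | some ev => if ev = "" then PreSub_pick available event_substr else ev ∈ available
  | none => PreSub_pick available event_substr

instance (available : List String) (event : Option String) (event_substr : Option String) : Decidable (Pre_pick_event_py available event event_substr) := by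
  unfold Pre_pick_event_py PreSub_pick
  rcases event with _ | ev <;> rcases event_substr with _ | sub <;> dsimp only <;> infer_instance

def pvWitness_pick_event_py : List String × Option String × Option String :=
  (["Alpha", "beta", "alp"], none, some "AL")

def Spec_pick_event_py (available : List String) (event : Option String) (event_substr : Option String) (out : String) : Prop := out = pick_event_py_alt available event event_substr
instance (available : List String) (event : Option String) (event_substr : Option String) (out : String) : Decidable (Spec_pick_event_py available event event_substr out) := by unfold Spec_pick_event_py; infer_instance

-- ===== CLAIM (what is proved, stated in full; the proofs are below) =====
def Claim_equal_pick_event_py : Prop := ∀ (available : List String) (event : Option String) (event_substr : Option String), Dom_pick_event_py available event event_substr → Pre_pick_event_py available event event_substr → Spec_pick_event_py available event event_substr (pick_event_py available event event_substr)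

-- ===== LEMMAS AND PROOFS =====

-- B's running minimum over a list equals the head of A's stable sort by length:
-- for stable insertion sort, inserting x into ys changes the head iff x is strictly shorter.
theorem scanMin_eq_sorted_head? (ms : List String) :
    ms.foldl (fun best e =>
        match best with
        | none => some e
        | some b => if PySem.Str.len e < PySem.Str.len b then some e else some b) none
      = (PySem.List.sorted ms (fun e => PySem.Str.len e)).head? := by
  rw [PySem.List.sorted_eq_foldl_insertBy]
  induction ms using List.reverseRecOn with
  | nil => rfl
  | append_singleton ms x ih =>
    rw [List.foldl_append, List.foldl_append, ih]
    simp only [List.foldl]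
    cases h : (List.foldl (fun acc x => PySem.List.insertBy (fun a b => decide (PySem.Str.len a < PySem.Str.len b)) x acc) [] ms) with
    | nil => simp [PySem.List.insertBy]
    | cons y t =>
      by_cases hlt : x.length < y.length <;>
        simp [PySem.List.insertBy, hlt]

-- the guarded fold over `available` is the plain fold over A's `matches`
theorem pickB_best_eq (subL : String) (available : List String) :
    pickB_best subL available
      = (available.filter (fun e => PySem.Str.isIn subL (PySem.Str.lower e))).foldl
          (fun best e =>
            match best with
            | none => some e
            | some b => if PySem.Str.len e < PySem.Str.len b then some e else some b) none := by
  rw [pickB_best, List.foldl_filter]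

theorem pickA_sub_eq (available : List String) (sub : String) (hsub : sub ≠ "")
    (hex : ∃ e ∈ available, PySem.Str.isIn (PySem.Str.lower sub) (PySem.Str.lower e) = true) :
    pickA_sub available (some sub) = (pickB_best (PySem.Str.lower sub) available).getD "" := by
  rw [pickB_best_eq, scanMin_eq_sorted_head?]
  unfold pickA_sub
  dsimp only
  rw [if_neg hsub]
  have hfm : pickA_matches available sub
      = available.filter (fun e => PySem.Str.isIn (PySem.Str.lower sub) (PySem.Str.lower e)) := rfl
  set ms := pickA_matches available sub with hms
  have hne : ms ≠ [] := by
    obtain ⟨e, he, hm⟩ := hex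
    intro h
    have : e ∈ ms := List.mem_filter.mpr ⟨he, hm⟩
    simp [h] at this
  have hlen : ¬ ms.length = 0 := by simpa [List.length_eq_zero_iff] using hne
  rw [if_neg hlen, hfm.symm]
  by_cases h1 : ms.length > 1
  · simp [h1, List.headD_eq_head?_getD]
  · -- exactly one element: sorting a singleton is itself
    have : ms.length = 1 := by omega
    obtain ⟨m, hm⟩ := List.length_eq_one_iff.mp this
    rw [if_neg h1, hm]
    simp [PySem.List.sorted, PySem.List.insertBy]

-- ===== VERDICT (by name: the statement is the Claim_ definition above) =====
theorem pick_event_py_spec : Claim_equal_pick_event_py := by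
  intro available event event_substr _hdom hpre
  unfold Spec_pick_event_py pick_event_py pick_event_py_alt
  have hsubcase : ∀ es, PreSub_pick available es →
      pickA_sub available es
        = (match es with
           | none => ""
           | some sub => if sub = "" then "" else (pickB_best (PySem.Str.lower sub) available).getD "") := by
    intro es hp
    cases es with
    | none => exact absurd hp (by simp [PreSub_pick])
    | some sub =>
      obtain ⟨hsub, hex⟩ := hp
      rw [pickA_sub_eq available sub hsub hex]
      simp [hsub]
  cases event with
  | none =>
    exact hsubcase event_substr hpre
  | some ev =>
    unfold Pre_pick_event_py at hpre
    by_cases hev : ev = ""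
    · simp only [hev] at hpre ⊢
      simpa using hsubcase event_substr hpre
    · simp only [if_neg hev] at hpre
      simp [hev, hpre]
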